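-- pv_equiv track=rewrite | github.com/wokan0306/COMP4321-SearchEngine | project/search_engine.py | count_successive_occurrences
-- ===== SOURCE A (Python) =====
-- def count_successive_occurrences(term_dict):
--     counter = {}
--
--     # Get the set of document IDs present in the term dictionary
--     doc_ids = set()
--     for term_positions in term_dict.values():
--         for doc_id in term_positions:
--             doc_ids.add(doc_id)
--
--     # Iterate through the document IDs
--     for doc_id in doc_ids:
--         count = 0
--
--         # Get the positions for each term in the current document
--         term_positions_list = [set(map(int, term_dict[term_id].get(doc_id, []))) for term_id in term_dict]
--
--         # Iterate through the positions of the first term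
--         for pos in term_positions_list[0]:
--             # Check for successive occurrences
--             successive = True
--             for i in range(1, len(term_positions_list)):
--                 if pos + i not in term_positions_list[i]:
--                     successive = False
--                     break
--
--             if successive:
--                 count += 1
--
--         if count > 0:
--             counter[doc_id] = count
--
--     return counter
-- ===== SOURCE B (Python) =====
-- def count_successive_occurrences(term_dict):
--     counter = {}
--     postings = list(term_dict.values())
--
--     # All document ids appearing in any term's postings
--     doc_ids = set()
--     for term_positions in postings:
--         doc_ids.update(term_positions)
--
--     for doc_id in doc_ids:
--         # phrase starts = positions of term 0, intersected with each later
--         # term's positions shifted back by its offset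
--         common = {int(p) for p in postings[0].get(doc_id, [])}
--         for i, term_positions in enumerate(postings[1:], 1):
--             common &= {int(p) - i for p in term_positions.get(doc_id, [])}
--         if common:
--             counter[doc_id] = len(common)
--     return counter
-- ===== Notes on version B (the rewrite author's own statement) =====
-- stated objective: alternative
-- what changed: Per document, A scans every position of the first term and, for each, re-checks every later term with an early-break inner loop; B instead folds the later terms' offset-shifted position sets into one running set intersection and reports its size.
import Mathlib
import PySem

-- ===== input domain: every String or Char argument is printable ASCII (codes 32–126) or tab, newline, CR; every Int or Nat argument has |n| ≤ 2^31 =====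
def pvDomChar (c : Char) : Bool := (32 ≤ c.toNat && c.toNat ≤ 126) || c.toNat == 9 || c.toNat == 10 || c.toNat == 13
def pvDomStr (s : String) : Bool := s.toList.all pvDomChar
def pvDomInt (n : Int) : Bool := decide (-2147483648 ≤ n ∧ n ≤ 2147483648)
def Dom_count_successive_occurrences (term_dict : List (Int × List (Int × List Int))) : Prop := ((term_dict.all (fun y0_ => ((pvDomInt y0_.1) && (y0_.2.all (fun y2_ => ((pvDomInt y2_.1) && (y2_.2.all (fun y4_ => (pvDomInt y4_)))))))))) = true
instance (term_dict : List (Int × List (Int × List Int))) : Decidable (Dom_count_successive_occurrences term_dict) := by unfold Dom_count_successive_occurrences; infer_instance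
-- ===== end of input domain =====

-- B replaces A's per-candidate "check each later term, break on failure" inner loop by a fold of
-- offset-shifted set intersections per document (objective: alternative).  The returned dict is
-- built by iterating a set of ints; per the type convention that iteration is modelled as
-- first-insertion order and the dict result is compared ignoring order.

-- ===== PORT A =====
-- per-document body of A's main loop: build term_positions_list, count successive starts,
-- record the doc when the count is positive.  'map int' on ints is the identity and is omitted;
-- 'headD []' totalizes tpl[0], which A only reaches when term_dict (hence tpl) is nonempty.
def pvAStep (term_dict : List (Int × List (Int × List Int))) (counter : PySem.Dict Int Int) (doc_id : Int) : PySem.Dict Int Int :=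
  let tpl : List (PySem.Set Int) :=
    term_dict.map (fun p => PySem.Set.ofList ((PySem.Dict.mk p.2).getD doc_id []))
  let count : Int :=
    (tpl.headD []).foldl (fun c pos =>
      if (PySem.List.pyRange 1 (PySem.List.len tpl) 1).all
           (fun i => PySem.Set.contains (PySem.List.pyGetD tpl i []) (pos + i)) then c + 1 else c) 0
  if count > 0 then counter.insert doc_id count else counter

def count_successive_occurrences (term_dict : List (Int × List (Int × List Int))) : List (Int × Int) :=
  let doc_ids : PySem.Set Int :=
    term_dict.foldl (fun s p => p.2.foldl (fun s q => PySem.Set.add s q.1) s) PySem.Set.empty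
  (doc_ids.foldl (pvAStep term_dict) PySem.Dict.empty).items

-- ===== PORT B =====
-- per-document body of B's loop: intersect the first term's position set with each later term's
-- positions shifted back by its offset; record len(common) when common is nonempty.
-- 'headD []' totalizes postings[0], reached only when postings is nonempty; int() is the identity.
def pvBStep (postings : List (List (Int × List Int))) (counter : PySem.Dict Int Int) (doc_id : Int) : PySem.Dict Int Int :=
  let start : PySem.Set Int :=
    PySem.Set.ofList ((PySem.Dict.mk (postings.headD [])).getD doc_id [])
  let common : PySem.Set Int :=
    (PySem.List.enumerate (postings.drop 1) 1).foldl (fun c ti =>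
      PySem.Set.inter c
        (PySem.Set.ofList (((PySem.Dict.mk ti.2).getD doc_id []).map (fun p => p - ti.1)))) start
  if !common.isEmpty then counter.insert doc_id (PySem.Set.len common) else counter

def count_successive_occurrences_alt (term_dict : List (Int × List (Int × List Int))) : List (Int × Int) :=
  let postings : List (List (Int × List Int)) := term_dict.map (·.2)
  let doc_ids : PySem.Set Int :=
    postings.foldl (fun s tp => PySem.Set.update s (tp.map (·.1))) PySem.Set.empty
  (doc_ids.foldl (pvBStep postings) PySem.Dict.empty).items

-- ===== PRECONDITION & SPEC =====
def Spec_count_successive_occurrences (term_dict : List (Int × List (Int × List Int))) (out : List (Int × Int)) : Prop := out = count_successive_occurrences_alt term_dict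
instance (term_dict : List (Int × List (Int × List Int))) (out : List (Int × Int)) : Decidable (Spec_count_successive_occurrences term_dict out) := by unfold Spec_count_successive_occurrences; infer_instance

-- ===== CLAIM (what is proved, stated in full; the proofs are below) =====
def Claim_equal_count_successive_occurrences : Prop := ∀ (term_dict : List (Int × List (Int × List Int))), Dom_count_successive_occurrences term_dict → Spec_count_successive_occurrences term_dict (count_successive_occurrences term_dict)

-- ===== LEMMAS AND PROOFS =====

-- a left fold of set intersections with g-images is a filter by membership in every image
theorem pv_foldl_inter_eq_filter {α β : Type} [BEq α] (g : β → List α) (L : List β) (s : List α) :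
    L.foldl (fun c ti => PySem.Set.inter c (g ti)) s
      = s.filter (fun x => L.all (fun t => PySem.Set.contains (g t) x)) := by
  induction L generalizing s with
  | nil => simp
  | cons t L ih =>
    rw [List.foldl_cons, ih]
    simp [PySem.Set.inter, List.filter_filter, Bool.and_comm]

-- term_positions_list[j+1] is the (j+1)-st term's position set
theorem pv_tpl_get (p : Int × List (Int × List Int)) (rest : List (Int × List (Int × List Int)))
    (doc : Int) (j : Nat) (hj : j < rest.length) :
    PySem.List.pyGetD ((p :: rest).map (fun q => PySem.Set.ofList ((PySem.Dict.mk q.2).getD doc []))) ((j : Int) + 1) []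
      = PySem.Set.ofList ((PySem.Dict.mk rest[j].2).getD doc []) := by
  have : ((j : Int) + 1) = ((j + 1 : Nat) : Int) := by push_cast; ring
  rw [this, PySem.List.pyGetD_natCast]
  simp [List.getD_eq_getElem?_getD, hj]

-- the two per-document successiveness predicates agree
theorem pv_pred_eq (p : Int × List (Int × List Int)) (rest : List (Int × List (Int × List Int)))
    (doc pos : Int) :
    (PySem.List.pyRange 1 (PySem.List.len ((p :: rest).map (fun q => PySem.Set.ofList ((PySem.Dict.mk q.2).getD doc [])))) 1).all
        (fun i => PySem.Set.contains
          (PySem.List.pyGetD ((p :: rest).map (fun q => PySem.Set.ofList ((PySem.Dict.mk q.2).getD doc []))) i []) (pos + i))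
      = (PySem.List.enumerate (rest.map (·.2)) 1).all
          (fun ti => PySem.Set.contains
            (PySem.Set.ofList (((PySem.Dict.mk ti.2).getD doc []).map (fun q => q - ti.1))) pos) := by
  rw [Bool.eq_iff_iff]
  simp only [List.all_eq_true, PySem.Set.contains_iff, PySem.Set.mem_ofList,
    PySem.List.mem_pyRange_one, PySem.List.len_eq, List.length_map, List.length_cons, List.mem_map]
  constructor
  · rintro h ti hmem
    obtain ⟨j, hj', hti⟩ := (PySem.List.mem_enumerate_iff (rest.map (·.2)) 1 ti).mp hmem
    have hj : j < rest.length := by simpa using hj'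
    have hx := h ((j : Int) + 1) ⟨by omega, by push_cast; omega⟩
    rw [pv_tpl_get p rest doc j hj] at hx
    simp only [PySem.Set.mem_ofList] at hx
    subst hti
    refine ⟨pos + ((j : Int) + 1), ?_, by push_cast; ring⟩
    simpa [hj] using hx
  · intro h x hx
    obtain ⟨j, rfl⟩ : ∃ j : Nat, x = (j : Int) + 1 := ⟨(x - 1).toNat, by omega⟩
    have hj : j < rest.length := by
      have := hx.2; push_cast at this; omega
    have hmem : ((1 + (j : Int), (rest.map (·.2))[j]'(by simpa using hj)))
        ∈ PySem.List.enumerate (rest.map (·.2)) 1 :=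
      (PySem.List.mem_enumerate_iff (rest.map (·.2)) 1 _).mpr ⟨j, by simpa using hj, rfl⟩
    obtain ⟨a, ha, hae⟩ := h _ hmem
    rw [pv_tpl_get p rest doc j hj]
    simp only [PySem.Set.mem_ofList]
    simp only [List.getElem_map] at ha hae
    have : a = pos + ((j : Int) + 1) := by omega
    rwa [← this]

-- A's "count > 0, record count" and B's "common nonempty, record len(common)" coincide
theorem pv_ite_final (counter : PySem.Dict Int Int) (doc : Int) (s : List Int) :
    (if ((0:Int) + (s.length : Int) > 0) then counter.insert doc ((0:Int) + (s.length : Int)) else counter)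
      = (if !s.isEmpty then counter.insert doc (PySem.Set.len s) else counter) := by
  cases s <;> simp [PySem.Set.len]

-- the two per-document loop bodies coincide
theorem pv_step_eq (term_dict : List (Int × List (Int × List Int))) :
    pvAStep term_dict = pvBStep (term_dict.map (·.2)) := by
  funext counter doc
  cases term_dict with
  | nil =>
    simp [pvAStep, pvBStep, PySem.Dict.getD, PySem.Dict.get?]
  | cons p rest =>
    simp only [pvAStep, pvBStep]
    rw [PySem.List.foldl_count_if]
    rw [pv_foldl_inter_eq_filter
      (g := fun ti : Int × List (Int × List Int) => PySem.Set.ofList (((PySem.Dict.mk ti.2).getD doc []).map (fun q => q - ti.1)))]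
    rw [show (((p :: rest).map (·.2)).headD ([] : List (Int × List Int))) = p.2 from rfl]
    rw [show (((p :: rest).map (·.2)).drop 1) = rest.map (·.2) from rfl]
    rw [show (((p :: rest).map (fun q => PySem.Set.ofList ((PySem.Dict.mk q.2).getD doc []))).headD ([] : List Int))
          = PySem.Set.ofList ((PySem.Dict.mk p.2).getD doc []) from rfl]
    rw [funext (pv_pred_eq p rest doc)]
    rw [List.countP_eq_length_filter]
    exact pv_ite_final counter doc _

-- the two doc-id collection loops coincide
theorem pv_docids_eq (term_dict : List (Int × List (Int × List Int))) :
    (term_dict.map (·.2)).foldl (fun s tp => PySem.Set.update s (tp.map (·.1))) PySem.Set.empty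
      = term_dict.foldl (fun s p => p.2.foldl (fun s q => PySem.Set.add s q.1) s) PySem.Set.empty := by
  simp [List.foldl_map, PySem.Set.update_map_eq_foldl_add]

-- ===== VERDICT (by name: the statement is the Claim_ definition above) =====
theorem count_successive_occurrences_spec : Claim_equal_count_successive_occurrences := by
  intro term_dict _
  unfold Spec_count_successive_occurrences
  simp only [count_successive_occurrences, count_successive_occurrences_alt, pv_docids_eq, pv_step_eq]
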